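-- pv_equiv track=rewrite | github.com/hssling/research-automation | hospital_antimicrobial_stewardship/02_data_extraction/data_extraction_system.py | _extract_intervention_components
-- ===== SOURCE A (Python) =====
-- from typing import Dict, List, Tuple, Optional
--
-- def _extract_intervention_components(title: str, abstract: str) -> List[str]:
--     """Extract specific intervention components."""
--     text_lower = f"{title} {abstract}".lower()
--
--     components = []
--
--     # Pre-authorization components
--     if any(keyword in text_lower for keyword in ['preauthorization', 'prior authorization', 'approval']):
--         components.append('Restricted formulary requiring approval')
--
--     # Audit and feedback components
--     if any(keyword in text_lower for keyword in ['audit', 'feedback', 'review']):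
--         components.append('Regular review of prescriptions')
--
--     # Rapid diagnostic components
--     if any(keyword in text_lower for keyword in ['rapid', 'pcr', 'maldi', 'diagnostic']):
--         components.append('Rapid diagnostic testing')
--
--     # CDSS components
--     if any(keyword in text_lower for keyword in ['cdss', 'computer', 'electronic', 'decision support']):
--         components.append('Electronic prescribing system')
--
--     # Education components
--     if any(keyword in text_lower for keyword in ['education', 'training', 'guideline']):
--         components.append('Educational sessions')
--
--     return components
-- ===== SOURCE B (Python) =====
-- _LABELS = [
--     'Restricted formulary requiring approval',
--     'Regular review of prescriptions',
--     'Rapid diagnostic testing',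
--     'Electronic prescribing system',
--     'Educational sessions',
-- ]
--
-- _KEYWORDS = [
--     ('preauthorization', 0), ('prior authorization', 0), ('approval', 0),
--     ('audit', 1), ('feedback', 1), ('review', 1),
--     ('rapid', 2), ('pcr', 2), ('maldi', 2), ('diagnostic', 2),
--     ('cdss', 3), ('computer', 3), ('electronic', 3), ('decision support', 3),
--     ('education', 4), ('training', 4), ('guideline', 4),
-- ]
--
--
-- def _extract_intervention_components(title: str, abstract: str):
--     """Single left-to-right scan over text positions: at each position mark
--     every component whose keyword starts there, then assemble the labels
--     from the hit flags."""
--     text = (title + " " + abstract).lower()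
--     hit = [False] * len(_LABELS)
--     for pos in range(len(text)):
--         for kw, g in _KEYWORDS:
--             if text.startswith(kw, pos):
--                 hit[g] = True
--     return [label for g, label in enumerate(_LABELS) if hit[g]]
-- ===== Notes on version B (the rewrite author's own statement) =====
-- stated objective: alternative
-- what changed: Replaces per-keyword substring-membership tests ('kw in text') in five unrolled branches by a single left-to-right scan over the text positions that tests which keywords start at each position and sets per-component hit flags, assembling the label list from the flags at the end.
import Mathlib
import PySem

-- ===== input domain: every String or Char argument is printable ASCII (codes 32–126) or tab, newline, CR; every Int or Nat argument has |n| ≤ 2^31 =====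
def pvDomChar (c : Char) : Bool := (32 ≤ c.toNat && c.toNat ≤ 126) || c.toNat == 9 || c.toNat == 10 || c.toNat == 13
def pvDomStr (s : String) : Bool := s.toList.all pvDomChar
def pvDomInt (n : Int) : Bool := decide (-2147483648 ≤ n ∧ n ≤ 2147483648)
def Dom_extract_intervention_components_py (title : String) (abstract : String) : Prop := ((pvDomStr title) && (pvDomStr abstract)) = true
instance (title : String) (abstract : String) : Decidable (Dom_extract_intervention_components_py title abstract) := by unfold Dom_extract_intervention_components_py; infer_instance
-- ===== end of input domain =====

-- B replaces A's per-keyword substring searches by a single left-to-right scan over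
-- text positions that marks hit flags per component, assembling labels at the end
-- (objective: alternative traversal, same asymptotic cost).

-- ===== PORT A =====
def extract_intervention_components_py (title : String) (abstract : String) : List String :=
  let text_lower := PySem.Str.lower (String.ofList (title.toList ++ ' ' :: abstract.toList))
  let components : List String := []
  let components := if ["preauthorization", "prior authorization", "approval"].any
      (fun k => PySem.Str.isIn k text_lower) then components ++ ["Restricted formulary requiring approval"] else components
  let components := if ["audit", "feedback", "review"].any
      (fun k => PySem.Str.isIn k text_lower) then components ++ ["Regular review of prescriptions"] else components
  let components := if ["rapid", "pcr", "maldi", "diagnostic"].any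
      (fun k => PySem.Str.isIn k text_lower) then components ++ ["Rapid diagnostic testing"] else components
  let components := if ["cdss", "computer", "electronic", "decision support"].any
      (fun k => PySem.Str.isIn k text_lower) then components ++ ["Electronic prescribing system"] else components
  let components := if ["education", "training", "guideline"].any
      (fun k => PySem.Str.isIn k text_lower) then components ++ ["Educational sessions"] else components
  components

-- ===== PORT B =====
-- _LABELS from Source B
def pvLabels : List String :=
  [ "Restricted formulary requiring approval"
  , "Regular review of prescriptions"
  , "Rapid diagnostic testing"
  , "Electronic prescribing system"
  , "Educational sessions" ]

-- _KEYWORDS from Source B: (keyword, component-group index)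
def pvKeywords : List (String × Nat) :=
  [ ("preauthorization", 0), ("prior authorization", 0), ("approval", 0)
  , ("audit", 1), ("feedback", 1), ("review", 1)
  , ("rapid", 2), ("pcr", 2), ("maldi", 2), ("diagnostic", 2)
  , ("cdss", 3), ("computer", 3), ("electronic", 3), ("decision support", 3)
  , ("education", 4), ("training", 4), ("guideline", 4) ]

def extract_intervention_components_py_alt (title : String) (abstract : String) : List String :=
  let text := PySem.Str.lower (String.ofList (title.toList ++ ' ' :: abstract.toList))
  let hit : List Bool := List.replicate 5 false
  let hit := (PySem.List.pyRange 0 (PySem.Str.len text) 1).foldl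
    (fun hit pos => pvKeywords.foldl
      (fun hit kg =>
        -- text.startswith(kw, pos): exact for the 0 ≤ pos < len(text) reached by the range
        if PySem.Chars.startswith (text.toList.drop pos.toNat) kg.1.toList then hit.set kg.2 true
        else hit)
      hit)
    hit
  ((PySem.List.enumerate pvLabels 0).filter
      (fun gl => PySem.List.pyGetD hit gl.1 false)).map (fun gl => gl.2)

-- ===== PRECONDITION & SPEC =====
def Spec_extract_intervention_components_py (title : String) (abstract : String) (out : List String) : Prop := out = extract_intervention_components_py_alt title abstract
instance (title : String) (abstract : String) (out : List String) : Decidable (Spec_extract_intervention_components_py title abstract out) := by unfold Spec_extract_intervention_components_py; infer_instance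

-- ===== CLAIM =====
def Claim_equal_extract_intervention_components_py : Prop := ∀ (title : String) (abstract : String), Dom_extract_intervention_components_py title abstract → Spec_extract_intervention_components_py title abstract (extract_intervention_components_py title abstract)

-- ===== LEMMAS AND PROOFS =====

-- a nonempty list is an infix iff it is a prefix of some suffix starting inside the list
theorem pvInfix_iff_exists_drop {α : Type} (kw s : List α) (hk : kw ≠ []) :
    kw <:+: s ↔ ∃ n, n < s.length ∧ kw <+: s.drop n := by
  induction s with
  | nil =>
    constructor
    · intro h
      exact absurd (List.eq_nil_of_infix_nil h) hk
    · rintro ⟨n, hn, -⟩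
      simp at hn
  | cons a l ih =>
    rw [List.infix_cons_iff]
    constructor
    · rintro (h | h)
      · exact ⟨0, by simp, h⟩
      · obtain ⟨n, hn, hp⟩ := ih.mp h
        exact ⟨n + 1, by simpa using hn, by simpa using hp⟩
    · rintro ⟨n, hn, hp⟩
      cases n with
      | zero => exact Or.inl hp
      | succ m =>
        refine Or.inr (ih.mpr ⟨m, ?_, by simpa using hp⟩)
        simp at hn; omega

-- the position scan finds a keyword iff it occurs as a substring
theorem pvScan_any (kw s : List Char) (hk : kw ≠ []) :
    (PySem.List.pyRange 0 (s.length : Int) 1).any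
      (fun pos => PySem.Chars.startswith (s.drop pos.toNat) kw)
      = PySem.Chars.isIn kw s := by
  rw [Bool.eq_iff_iff]
  simp only [List.any_eq_true, PySem.List.mem_pyRange_one, PySem.Chars.isIn_iff_infix,
    pvInfix_iff_exists_drop kw s hk, PySem.Chars.startswith_iff]
  constructor
  · rintro ⟨pos, ⟨h0, hl⟩, hp⟩
    exact ⟨pos.toNat, by omega, hp⟩
  · rintro ⟨n, hn, hp⟩
    exact ⟨(n : Int), ⟨Int.natCast_nonneg n, by exact_mod_cast hn⟩, by simpa using hp⟩

-- the inner keyword loop preserves the length of the flag list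
theorem pvInner_length (c : String × Nat → Bool) (ks : List (String × Nat)) :
    ∀ (h : List Bool),
      (ks.foldl (fun h kg => if c kg then h.set kg.2 true else h) h).length = h.length := by
  induction ks with
  | nil => intro h; rfl
  | cons kg ks ih =>
    intro h
    simp only [List.foldl_cons]
    split
    · rw [ih]; simp
    · rw [ih]

-- what the inner keyword loop does to one flag
theorem pvInner_getElem? (c : String × Nat → Bool) (ks : List (String × Nat)) :
    ∀ (h : List Bool) (g : Nat), (∀ kg ∈ ks, kg.2 < h.length) →
      (ks.foldl (fun h kg => if c kg then h.set kg.2 true else h) h)[g]?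
        = h[g]?.map (fun b => b || ks.any (fun kg => kg.2 == g && c kg)) := by
  induction ks with
  | nil =>
    intro h g _
    simp
  | cons kg ks ih =>
    intro h g hlt
    have hkg : kg.2 < h.length := hlt kg (by simp)
    simp only [List.foldl_cons]
    by_cases hc : c kg
    · rw [if_pos hc]
      rw [ih (h.set kg.2 true) g (by intro x hx; simpa using hlt x (by simp [hx]))]
      rw [List.getElem?_set]
      by_cases hg : kg.2 = g
      · subst hg
        rw [if_pos rfl, if_pos hkg]
        rw [List.getElem?_eq_getElem hkg]
        simp [hc]
      · rw [if_neg hg]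
        have hb : (kg.2 == g) = false := by rw [beq_eq_false_iff_ne]; exact hg
        simp [hc, hb]
    · rw [if_neg hc]
      rw [ih h g (by intro x hx; exact hlt x (by simp [hx]))]
      simp [hc]

-- what the outer position loop does to one flag
theorem pvOuter_getElem? (c : Int → String × Nat → Bool) (ks : List (String × Nat))
    (hks : ∀ kg ∈ ks, kg.2 < 5) (ps : List Int) :
    ∀ (h : List Bool), h.length = 5 → ∀ (g : Nat),
      (ps.foldl (fun h pos => ks.foldl
          (fun h kg => if c pos kg then h.set kg.2 true else h) h) h)[g]?
        = h[g]?.map (fun b => b || ps.any (fun pos => ks.any (fun kg => kg.2 == g && c pos kg))) := by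
  induction ps with
  | nil =>
    intro h _ g
    simp
  | cons p ps ih =>
    intro h hh g
    simp only [List.foldl_cons]
    rw [ih _ (by rw [pvInner_length]; exact hh) g]
    rw [pvInner_getElem? (c p) ks h g (by intro x hx; rw [hh]; exact hks x hx)]
    rw [Option.map_map]
    apply congrArg (fun f => Option.map f h[g]?)
    funext b
    simp [Bool.or_assoc]

-- distribute .any over a pointwise disjunction
theorem pvAny_or {α : Type} (l : List α) (p q : α → Bool) :
    l.any (fun x => p x || q x) = (l.any p || l.any q) := by
  induction l with
  | nil => rfl
  | cons a l ih =>
    simp only [List.any_cons, ih]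
    cases p a <;> cases q a <;> cases l.any p <;> cases l.any q <;> rfl

-- swap two nested .any
theorem pvAny_swap {α β : Type} (l1 : List α) (l2 : List β) (p : α → β → Bool) :
    l1.any (fun x => l2.any (fun y => p x y)) = l2.any (fun y => l1.any (fun x => p x y)) := by
  induction l2 with
  | nil => simp
  | cons b l2 ih =>
    simp only [List.any_cons]
    rw [pvAny_or l1 (fun x => p x b) (fun x => l2.any (fun y => p x y)), ih]

-- the position scan over a whole keyword group equals the group's substring test
theorem pvScan_group (s : List Char) (kws : List String) (hne : ∀ k ∈ kws, k.toList ≠ []) :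
    (PySem.List.pyRange 0 (s.length : Int) 1).any
      (fun pos => kws.any (fun k => PySem.Chars.startswith (s.drop pos.toNat) k.toList))
      = kws.any (fun k => PySem.Chars.isIn k.toList s) := by
  rw [pvAny_swap]
  induction kws with
  | nil => rfl
  | cons k ks ih =>
    simp only [List.any_cons]
    rw [pvScan_any k.toList s (hne k (by simp)), ih (fun x hx => hne x (by simp [hx]))]

-- one flag of B equals A's substring condition for that group
theorem pvGroup_flag (s : List Char) (g : Nat) (kws : List String)
    (hmatch : ∀ pos : Int,
      (pvKeywords.any (fun kg => kg.2 == g &&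
          PySem.Chars.startswith (s.drop pos.toNat) kg.1.toList))
        = kws.any (fun k => PySem.Chars.startswith (s.drop pos.toNat) k.toList))
    (hne : ∀ k ∈ kws, k.toList ≠ []) :
    (PySem.List.pyRange 0 (s.length : Int) 1).any
      (fun pos => pvKeywords.any (fun kg => kg.2 == g &&
          PySem.Chars.startswith (s.drop pos.toNat) kg.1.toList))
      = kws.any (fun k => PySem.Chars.isIn k.toList s) := by
  rw [List.any_congr rfl hmatch]
  exact pvScan_group s kws hne

-- B evaluated: the scan-and-flags pipeline equals the five-group concatenation
theorem pvAlt_eval (title : String) (abstract : String) :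
    extract_intervention_components_py_alt title abstract
      = ((if ["preauthorization", "prior authorization", "approval"].any
            (fun k => PySem.Str.isIn k (PySem.Str.lower (String.ofList (title.toList ++ ' ' :: abstract.toList))))
          then ["Restricted formulary requiring approval"] else [])
        ++ ((if ["audit", "feedback", "review"].any
            (fun k => PySem.Str.isIn k (PySem.Str.lower (String.ofList (title.toList ++ ' ' :: abstract.toList))))
          then ["Regular review of prescriptions"] else [])
        ++ ((if ["rapid", "pcr", "maldi", "diagnostic"].any
            (fun k => PySem.Str.isIn k (PySem.Str.lower (String.ofList (title.toList ++ ' ' :: abstract.toList))))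
          then ["Rapid diagnostic testing"] else [])
        ++ ((if ["cdss", "computer", "electronic", "decision support"].any
            (fun k => PySem.Str.isIn k (PySem.Str.lower (String.ofList (title.toList ++ ' ' :: abstract.toList))))
          then ["Electronic prescribing system"] else [])
        ++ (if ["education", "training", "guideline"].any
            (fun k => PySem.Str.isIn k (PySem.Str.lower (String.ofList (title.toList ++ ' ' :: abstract.toList))))
          then ["Educational sessions"] else []))))) := by
  unfold extract_intervention_components_py_alt
  generalize PySem.Str.lower (String.ofList (title.toList ++ ' ' :: abstract.toList)) = t
  dsimp only
  simp only [PySem.Str.len_eq, PySem.Str.isIn_eq]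
  have hout := pvOuter_getElem?
      (fun pos kg => PySem.Chars.startswith (t.toList.drop pos.toNat) kg.1.toList)
      pvKeywords (by decide)
      (PySem.List.pyRange 0 (t.toList.length : Int) 1)
      (List.replicate 5 false) (by simp)
  beta_reduce at hout
  have h0 := hout 0
  have h1 := hout 1
  have h2 := hout 2
  have h3 := hout 3
  have h4 := hout 4
  simp only [List.getElem?_replicate, Nat.reduceLT, if_true, Option.map_some, Bool.false_or] at h0 h1 h2 h3 h4
  have henum : PySem.List.enumerate pvLabels 0
      = [((0 : Int), "Restricted formulary requiring approval"),
         (1, "Regular review of prescriptions"),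
         (2, "Rapid diagnostic testing"),
         (3, "Electronic prescribing system"),
         (4, "Educational sessions")] := by decide
  rw [henum]
  simp only [List.filter_cons, List.filter_nil, PySem.List.pyGetD_ofNat',
    List.getD_eq_getElem?_getD, h0, h1, h2, h3, h4, Option.getD_some]
  rw [pvGroup_flag t.toList 0 ["preauthorization", "prior authorization", "approval"]
        (by intro pos; simp [pvKeywords]) (by decide),
      pvGroup_flag t.toList 1 ["audit", "feedback", "review"]
        (by intro pos; simp [pvKeywords]) (by decide),
      pvGroup_flag t.toList 2 ["rapid", "pcr", "maldi", "diagnostic"]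
        (by intro pos; simp [pvKeywords]) (by decide),
      pvGroup_flag t.toList 3 ["cdss", "computer", "electronic", "decision support"]
        (by intro pos; simp [pvKeywords]) (by decide),
      pvGroup_flag t.toList 4 ["education", "training", "guideline"]
        (by intro pos; simp [pvKeywords]) (by decide)]
  rcases Bool.eq_false_or_eq_true (["preauthorization", "prior authorization", "approval"].any
      (fun k => PySem.Chars.isIn k.toList t.toList)) with hb1 | hb1 <;>
  rcases Bool.eq_false_or_eq_true (["audit", "feedback", "review"].any
      (fun k => PySem.Chars.isIn k.toList t.toList)) with hb2 | hb2 <;>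
  rcases Bool.eq_false_or_eq_true (["rapid", "pcr", "maldi", "diagnostic"].any
      (fun k => PySem.Chars.isIn k.toList t.toList)) with hb3 | hb3 <;>
  rcases Bool.eq_false_or_eq_true (["cdss", "computer", "electronic", "decision support"].any
      (fun k => PySem.Chars.isIn k.toList t.toList)) with hb4 | hb4 <;>
  rcases Bool.eq_false_or_eq_true (["education", "training", "guideline"].any
      (fun k => PySem.Chars.isIn k.toList t.toList)) with hb5 | hb5 <;>
  simp only [hb1, hb2, hb3, hb4, hb5] <;> rfl

-- ===== VERDICT =====
theorem extract_intervention_components_py_spec : Claim_equal_extract_intervention_components_py := by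
  intro title abstract _
  unfold Spec_extract_intervention_components_py
  rw [pvAlt_eval]
  unfold extract_intervention_components_py
  generalize PySem.Str.lower (String.ofList (title.toList ++ ' ' :: abstract.toList)) = t
  dsimp only
  simp only [PySem.Str.isIn_eq]
  rcases Bool.eq_false_or_eq_true (["preauthorization", "prior authorization", "approval"].any
      (fun k => PySem.Chars.isIn k.toList t.toList)) with hb1 | hb1 <;>
  rcases Bool.eq_false_or_eq_true (["audit", "feedback", "review"].any
      (fun k => PySem.Chars.isIn k.toList t.toList)) with hb2 | hb2 <;>
  rcases Bool.eq_false_or_eq_true (["rapid", "pcr", "maldi", "diagnostic"].any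
      (fun k => PySem.Chars.isIn k.toList t.toList)) with hb3 | hb3 <;>
  rcases Bool.eq_false_or_eq_true (["cdss", "computer", "electronic", "decision support"].any
      (fun k => PySem.Chars.isIn k.toList t.toList)) with hb4 | hb4 <;>
  rcases Bool.eq_false_or_eq_true (["education", "training", "guideline"].any
      (fun k => PySem.Chars.isIn k.toList t.toList)) with hb5 | hb5 <;>
  simp only [hb1, hb2, hb3, hb4, hb5] <;> rfl
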